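-- pv_equiv track=rewrite | github.com/taehee-kim-dev/Problem-solving | Programmers/Kakao/Level3/2020_KAKAO_BLIND_RECRUITMENT/Exterior_wall _inspection.py | get_all_weak_by_starting_point
-- ===== SOURCE A (Python) =====
-- from copy import deepcopy
--
-- def get_all_weak_by_starting_point(n, weak):
--     all_weak = []
--     """
--     [1, 5, 6, 10]
--     [5, 6, 10, n + 1]
--     [6, 10, n + 1, n + 5]
--     [10, n + 1, n + 5, n + 6]
--     """
--     for _ in range(len(weak)):
--         all_weak.append(deepcopy(weak))
--         first_weak_position = weak.pop(0)
--         weak.append(n + first_weak_position)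
--     return all_weak
-- ===== SOURCE B (Python) =====
-- def get_all_weak_by_starting_point(n, weak):
--     all_weak = [weak[i:] + [n + x for x in weak[:i]] for i in range(len(weak))]
--     weak[:] = [n + x for x in weak]
--     return all_weak
-- ===== Notes on version B (the rewrite author's own statement) =====
-- stated objective: simpler
-- what changed: Replaces the stateful deepcopy/pop/append rotation loop with a stateless index comprehension building each rotated row directly (weak[i:] + shifted weak[:i]), followed by one slice assignment reproducing A's mutation of weak.
import Mathlib
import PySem

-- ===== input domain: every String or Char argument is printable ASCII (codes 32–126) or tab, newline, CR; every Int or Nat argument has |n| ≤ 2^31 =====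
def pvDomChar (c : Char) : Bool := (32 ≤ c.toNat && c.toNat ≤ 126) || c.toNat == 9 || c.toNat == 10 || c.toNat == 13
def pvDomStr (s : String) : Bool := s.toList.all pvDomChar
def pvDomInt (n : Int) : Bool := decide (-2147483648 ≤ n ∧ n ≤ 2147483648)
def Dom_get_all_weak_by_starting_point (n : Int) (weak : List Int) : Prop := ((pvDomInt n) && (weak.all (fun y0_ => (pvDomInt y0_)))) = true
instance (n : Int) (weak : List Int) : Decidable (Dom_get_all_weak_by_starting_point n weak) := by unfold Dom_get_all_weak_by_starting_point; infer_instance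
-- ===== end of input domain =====

-- ===== PORT A =====
-- `rot` is one loop iteration's mutation of `weak`: pop(0) then append(n + popped).
-- (pop(0) on [] would raise IndexError in Python, but the loop body only ever sees the
-- nonempty states reached from the initial `weak`, whose length the step preserves.)
def pvRotA (n : Int) (w : List Int) : List Int :=
  match w with
  | [] => []
  | x :: rest => rest ++ [n + x]

-- the for-loop over range(len(weak)) with state (weak, all_weak)
def pvLoopA (n : Int) : Nat → List Int → List (List Int) → List (List Int)
  | 0, _, acc => acc
  | k + 1, w, acc => pvLoopA n k (pvRotA n w) (acc ++ [w])

def get_all_weak_by_starting_point (n : Int) (weak : List Int) : List (List Int) :=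
  pvLoopA n weak.length weak []

-- ===== PORT B =====
-- B: all_weak = [weak[i:] + [n + x for x in weak[:i]] for i in range(len(weak))]
-- (i ranges over 0 ≤ i < len(weak), where the slices weak[i:], weak[:i] are drop/take i;
-- return-value equivalence only: both Pythons also mutate weak to [n + x for x in weak])
def get_all_weak_by_starting_point_alt (n : Int) (weak : List Int) : List (List Int) :=
  (List.range weak.length).map (fun i => weak.drop i ++ (weak.take i).map (fun x => n + x))

-- ===== PRECONDITION & SPEC =====
def Spec_get_all_weak_by_starting_point (n : Int) (weak : List Int) (out : List (List Int)) : Prop := out = get_all_weak_by_starting_point_alt n weak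
instance (n : Int) (weak : List Int) (out : List (List Int)) : Decidable (Spec_get_all_weak_by_starting_point n weak out) := by unfold Spec_get_all_weak_by_starting_point; infer_instance

-- ===== CLAIM (what is proved, stated in full; the proofs are below) =====
def Claim_equal_get_all_weak_by_starting_point : Prop := ∀ (n : Int) (weak : List Int), Dom_get_all_weak_by_starting_point n weak → Spec_get_all_weak_by_starting_point n weak (get_all_weak_by_starting_point n weak)

-- ===== LEMMAS AND PROOFS =====

-- A's loop appends, in order, the iterates of pvRotA starting from w.
theorem pvLoopA_eq (n : Int) (k : Nat) (w : List Int) (acc : List (List Int)) :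
    pvLoopA n k w acc = acc ++ (List.range k).map (fun j => (pvRotA n)^[j] w) := by
  induction k generalizing w acc with
  | zero => simp [pvLoopA]
  | succ k ih =>
      rw [pvLoopA, ih, List.range_succ_eq_map]
      simp [Function.iterate_succ_apply, List.map_map, Function.comp_def]

-- The i-th iterate of the rotation step is B's i-th row (for i ≤ |weak|).
theorem pvRotA_iterate (n : Int) (weak : List Int) :
    ∀ i, i ≤ weak.length →
      (pvRotA n)^[i] weak = weak.drop i ++ (weak.take i).map (fun x => n + x) := by
  intro i
  induction i with
  | zero => simp
  | succ i ih =>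
      intro hle
      have hi : i < weak.length := Nat.lt_of_succ_le hle
      rw [Function.iterate_succ_apply', ih (Nat.le_of_lt hi),
        List.drop_eq_getElem_cons hi]
      have htake : weak.take (i + 1) = weak.take i ++ [weak[i]] :=
        List.take_succ_eq_append_getElem hi
      rw [List.cons_append, htake]
      simp only [pvRotA, List.map_append, List.map_cons, List.map_nil,
        List.append_assoc]

-- ===== VERDICT (by name: the statement is the Claim_ definition above) =====
theorem get_all_weak_by_starting_point_spec : Claim_equal_get_all_weak_by_starting_point := by
  intro n weak _
  show _ = _
  rw [get_all_weak_by_starting_point, pvLoopA_eq]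
  simp only [List.nil_append, get_all_weak_by_starting_point_alt]
  exact List.map_congr_left fun i hi =>
    pvRotA_iterate n weak i (Nat.le_of_lt (List.mem_range.mp hi))
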